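-- pv_equiv track=rewrite | github.com/nexgen-tech-labs/infrajet-nexgen-repo | backend/app/services/projects/file_viewing_service.py | _highlight_json
-- ===== SOURCE A (Python) =====
-- def _highlight_json(content: str) -> str:
--     """Apply basic JSON syntax highlighting."""
--     # This is a simplified implementation
--     # In a real implementation, you'd use a proper syntax highlighter
--     lines = content.split("\n")
--     highlighted_lines = []
--
--     for line in lines:
--         # Basic JSON highlighting patterns
--         line = line.replace('"', '<span class="json-string">"</span>')
--         line = line.replace(":", '<span class="json-colon">:</span>')
--         line = line.replace("{", '<span class="json-brace">{</span>')
--         line = line.replace("}", '<span class="json-brace">}</span>')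
--         highlighted_lines.append(line)
--
--     return "\n".join(highlighted_lines)
-- ===== SOURCE B (Python) =====
-- def _highlight_json(content: str) -> str:
--     """Apply basic JSON syntax highlighting (single table-driven pass)."""
--     table = {
--         '"': '<span class="json-string">"</span>',
--         ':': '<span class="json-colon">:</span>',
--         '{': '<span class="json-brace">{</span>',
--         '}': '<span class="json-brace">}</span>',
--     }
--     out = []
--     for ch in content:
--         out.append(table.get(ch, ch))
--     return "".join(out)
-- ===== Notes on version B (the rewrite author's own statement) =====
-- stated objective: idiomatic
-- what changed: Replaces A's newline-split plus four sequential full-string replace passes per line with a single table-driven pass over the characters, appending each character's dict-mapped span (or the character itself) and joining once.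
import Mathlib
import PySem

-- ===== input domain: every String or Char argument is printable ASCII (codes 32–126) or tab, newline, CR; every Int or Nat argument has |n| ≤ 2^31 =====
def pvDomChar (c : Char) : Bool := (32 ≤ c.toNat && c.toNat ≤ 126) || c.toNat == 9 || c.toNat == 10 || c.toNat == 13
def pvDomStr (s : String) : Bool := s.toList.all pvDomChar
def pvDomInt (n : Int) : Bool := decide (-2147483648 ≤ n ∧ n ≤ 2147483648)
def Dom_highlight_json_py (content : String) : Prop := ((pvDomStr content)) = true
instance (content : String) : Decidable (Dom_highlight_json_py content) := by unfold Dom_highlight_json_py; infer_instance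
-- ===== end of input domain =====

-- B replaces A's four full-string replace passes over each '\n'-split line by one table-driven pass over the characters (objective: idiomatic); same return value everywhere.

-- ===== PORT A =====
def spanQuoteA : List Char := "<span class=\"json-string\">\"</span>".toList
def spanColonA : List Char := "<span class=\"json-colon\">:</span>".toList
def spanLBraceA : List Char := "<span class=\"json-brace\">{</span>".toList
def spanRBraceA : List Char := "<span class=\"json-brace\">}</span>".toList

def highlight_json_py (content : String) : String :=
  let lines := PySem.Chars.splitOn content.toList ['\n']
  let highlighted_lines := lines.foldl (fun acc line =>
    let l1 := PySem.Chars.replace line ['"'] spanQuoteA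
    let l2 := PySem.Chars.replace l1 [':'] spanColonA
    let l3 := PySem.Chars.replace l2 ['{'] spanLBraceA
    let l4 := PySem.Chars.replace l3 ['}'] spanRBraceA
    acc ++ [l4]) ([] : List (List Char))
  String.ofList (PySem.Chars.join ['\n'] highlighted_lines)

-- ===== PORT B =====
def bTable : PySem.Dict Char (List Char) :=
  PySem.Dict.ofList
    [('"', "<span class=\"json-string\">\"</span>".toList),
     (':', "<span class=\"json-colon\">:</span>".toList),
     ('{', "<span class=\"json-brace\">{</span>".toList),
     ('}', "<span class=\"json-brace\">}</span>".toList)]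

def highlight_json_py_alt (content : String) : String :=
  let out := content.toList.foldl (fun acc c => acc ++ [PySem.Dict.getD bTable c [c]]) ([] : List (List Char))
  String.ofList (PySem.Chars.join [] out)

-- ===== PRECONDITION & SPEC =====
def Spec_highlight_json_py (content : String) (out : String) : Prop := out = highlight_json_py_alt content
instance (content : String) (out : String) : Decidable (Spec_highlight_json_py content out) := by unfold Spec_highlight_json_py; infer_instance

-- ===== CLAIM (what is proved, stated in full; the proofs are below) =====
def Claim_equal_highlight_json_py : Prop := ∀ (content : String), Dom_highlight_json_py content → Spec_highlight_json_py content (highlight_json_py content)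

-- ===== LEMMAS AND PROOFS =====

-- the per-character substitution B implements
def hlChar (c : Char) : List Char := PySem.Dict.getD bTable c [c]

-- str.replace with a single-character pattern is a character-wise flatMap
theorem replace_go_single (x : Char) (new : List Char) :
    ∀ (fuel : Nat) (l acc : List Char), l.length ≤ fuel →
      PySem.Chars.replace.go [x] new fuel l acc
        = acc.reverse ++ l.flatMap (fun c => if c = x then new else [c]) := by
  intro fuel
  induction fuel with
  | zero =>
    intro l acc h
    have hl : l = [] := List.eq_nil_of_length_eq_zero (Nat.le_zero.mp h)
    subst hl; simp [PySem.Chars.replace.go]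
  | succ n ih =>
    intro l acc h
    cases l with
    | nil => simp [PySem.Chars.replace.go]
    | cons c t =>
      by_cases hc : c = x
      · subst hc
        have hp : List.isPrefixOf [c] (c :: t) = true := by simp [List.isPrefixOf]
        simp only [PySem.Chars.replace.go, hp, reduceIte, List.length_cons, List.length_nil,
          List.drop_succ_cons, List.drop_zero]
        rw [ih t (new.reverse ++ acc) (by simpa using Nat.le_of_succ_le_succ h)]
        simp
      · have hp : List.isPrefixOf [x] (c :: t) = false := by
          simp [List.isPrefixOf]; exact fun h' => (hc h'.symm).elim
        simp only [PySem.Chars.replace.go, hp]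
        rw [if_neg (by simp)]
        rw [ih t (c :: acc) (by simpa using Nat.le_of_succ_le_succ h)]
        simp [hc]

theorem replace_single (x : Char) (new l : List Char) :
    PySem.Chars.replace l [x] new = l.flatMap (fun c => if c = x then new else [c]) := by
  have he : ([x] : List Char).isEmpty = false := rfl
  simp only [PySem.Chars.replace, he, Bool.false_eq_true, if_false]
  simpa using replace_go_single x new l.length l [] (le_refl _)

-- splitOn.go: the accumulator factors out
theorem splitOn_go_acc (x : Char) :
    ∀ (fuel : Nat) (l cur : List Char) (accs : List (List Char)),
      PySem.Chars.splitOn.go [x] fuel l cur accs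
        = accs.reverse ++ PySem.Chars.splitOn.go [x] fuel l cur [] := by
  intro fuel
  induction fuel with
  | zero => intro l cur accs; simp [PySem.Chars.splitOn.go]
  | succ n ih =>
    intro l cur accs
    cases l with
    | nil => simp [PySem.Chars.splitOn.go]
    | cons c t =>
      by_cases hc : c = x
      · subst hc
        have hp : List.isPrefixOf [c] (c :: t) = true := by simp [List.isPrefixOf]
        simp only [PySem.Chars.splitOn.go, hp, reduceIte, List.length_cons, List.length_nil,
          List.drop_succ_cons, List.drop_zero]
        rw [ih t [] (cur.reverse :: accs), ih t [] [cur.reverse]]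
        simp
      · have hp : List.isPrefixOf [x] (c :: t) = false := by
          simp [List.isPrefixOf]; exact fun h' => (hc h'.symm).elim
        simp only [PySem.Chars.splitOn.go, hp]
        rw [if_neg (by simp), if_neg (by simp)]
        exact ih t (c :: cur) accs

theorem splitOn_go_ne_nil (x : Char) :
    ∀ (fuel : Nat) (l cur : List Char), PySem.Chars.splitOn.go [x] fuel l cur [] ≠ [] := by
  intro fuel
  induction fuel with
  | zero => intro l cur; simp [PySem.Chars.splitOn.go]
  | succ n ih =>
    intro l cur
    cases l with
    | nil => simp [PySem.Chars.splitOn.go]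
    | cons c t =>
      by_cases hc : c = x
      · subst hc
        have hp : List.isPrefixOf [c] (c :: t) = true := by simp [List.isPrefixOf]
        simp only [PySem.Chars.splitOn.go, hp, reduceIte, List.length_cons, List.length_nil,
          List.drop_succ_cons, List.drop_zero]
        rw [splitOn_go_acc c n t [] [cur.reverse]]
        simp
      · have hp : List.isPrefixOf [x] (c :: t) = false := by
          simp [List.isPrefixOf]; exact fun h' => (hc h'.symm).elim
        simp only [PySem.Chars.splitOn.go, hp]
        rw [if_neg (by simp)]
        exact ih t (c :: cur)

theorem join_splitOn_go (x : Char) :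
    ∀ (fuel : Nat) (l cur : List Char), l.length < fuel →
      PySem.Chars.join [x] (PySem.Chars.splitOn.go [x] fuel l cur []) = cur.reverse ++ l := by
  intro fuel
  induction fuel with
  | zero => intro l cur h; omega
  | succ n ih =>
    intro l cur h
    cases l with
    | nil => simp [PySem.Chars.splitOn.go, PySem.Chars.join, List.intercalate]
    | cons c t =>
      by_cases hc : c = x
      · subst hc
        have hp : List.isPrefixOf [c] (c :: t) = true := by simp [List.isPrefixOf]
        simp only [PySem.Chars.splitOn.go, hp, reduceIte, List.length_cons, List.length_nil,
          List.drop_succ_cons, List.drop_zero]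
        rw [splitOn_go_acc c n t [] [cur.reverse]]
        obtain ⟨p, ps, hps⟩ : ∃ p ps, PySem.Chars.splitOn.go [c] n t [] [] = p :: ps := by
          cases hgo : PySem.Chars.splitOn.go [c] n t [] [] with
          | nil => exact absurd hgo (splitOn_go_ne_nil c n t [])
          | cons p ps => exact ⟨p, ps, rfl⟩
        have ht : PySem.Chars.join [c] (PySem.Chars.splitOn.go [c] n t [] []) = t :=
          ih t [] (by simpa using Nat.lt_of_succ_lt_succ h)
        rw [hps] at ht ⊢
        simp only [List.reverse_singleton, List.singleton_append, PySem.Chars.join,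
          List.intercalate] at ht ⊢
        simp at ht ⊢
        simp [ht]
      · have hp : List.isPrefixOf [x] (c :: t) = false := by
          simp [List.isPrefixOf]; exact fun h' => (hc h'.symm).elim
        simp only [PySem.Chars.splitOn.go, hp]
        rw [if_neg (by simp)]
        rw [ih t (c :: cur) (by simpa using Nat.lt_of_succ_lt_succ h)]
        simp

theorem join_splitOn (x : Char) (l : List Char) :
    PySem.Chars.join [x] (PySem.Chars.splitOn l [x]) = l := by
  simpa using join_splitOn_go x (l.length + 1) l [] (by omega)

theorem join_nil_eq_flatten (parts : List (List Char)) :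
    PySem.Chars.join [] parts = parts.flatten := by
  induction parts with
  | nil => rfl
  | cons a t ih =>
    cases t with
    | nil => simp [PySem.Chars.join, List.intercalate]
    | cons b t' =>
      simp only [PySem.Chars.join, List.intercalate] at ih ⊢
      simp at ih ⊢
      simp [ih]

theorem join_map_flatMap (x : Char) (G : Char → List Char) (hx : G x = [x])
    (parts : List (List Char)) :
    PySem.Chars.join [x] (parts.map (fun p => p.flatMap G)) = (PySem.Chars.join [x] parts).flatMap G := by
  induction parts with
  | nil => rfl
  | cons a t ih =>
    cases t with
    | nil => simp [PySem.Chars.join, List.intercalate]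
    | cons b t' =>
      simp only [PySem.Chars.join, List.intercalate, List.map_cons] at ih ⊢
      simp at ih ⊢
      simp [ih, hx]

-- the composition of A's four substitutions equals B's table lookup, per character
theorem four_subst_eq_hlChar (c : Char) :
    ((((if c = '"' then spanQuoteA else [c]).flatMap
        (fun d => if d = ':' then spanColonA else [d])).flatMap
        (fun d => if d = '{' then spanLBraceA else [d])).flatMap
        (fun d => if d = '}' then spanRBraceA else [d])) = hlChar c := by
  by_cases h1 : c = '"'
  · subst h1; decide
  by_cases h2 : c = ':'
  · subst h2; decide
  by_cases h3 : c = '{'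
  · subst h3; decide
  by_cases h4 : c = '}'
  · subst h4; decide
  have hkeys : bTable.items.map Prod.fst = ['"', ':', '{', '}'] := by decide
  have hf : List.find? (fun p => p.1 == c) bTable.items = none := by
    rw [List.find?_eq_none]
    intro p hp
    have hm : p.1 ∈ bTable.items.map Prod.fst := List.mem_map_of_mem hp
    rw [hkeys] at hm
    simp only [List.mem_cons, List.not_mem_nil, or_false] at hm
    simp only [beq_iff_eq]
    intro hpc
    rcases hm with h | h | h | h
    · exact h1 (hpc.symm.trans h)
    · exact h2 (hpc.symm.trans h)
    · exact h3 (hpc.symm.trans h)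
    · exact h4 (hpc.symm.trans h)
  simp [h1, h2, h3, h4, hlChar, PySem.Dict.getD, PySem.Dict.get?, hf]

-- ===== VERDICT (by name: the statement is the Claim_ definition above) =====
theorem highlight_json_py_spec : Claim_equal_highlight_json_py := by
  intro content _
  unfold Spec_highlight_json_py highlight_json_py highlight_json_py_alt
  simp only []
  rw [PySem.List.foldl_append_singleton_eq_map, PySem.List.foldl_append_singleton_eq_map]
  simp only [List.nil_append]
  rw [join_nil_eq_flatten]
  have hB : (content.toList.map (fun c => PySem.Dict.getD bTable c [c])).flatten
      = content.toList.flatMap hlChar := by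
    rw [List.flatMap_def]; rfl
  have hr : (fun line => PySem.Chars.replace
      (PySem.Chars.replace
        (PySem.Chars.replace (PySem.Chars.replace line ['"'] spanQuoteA) [':'] spanColonA)
        ['{'] spanLBraceA) ['}'] spanRBraceA)
      = fun line => line.flatMap hlChar := by
    funext line
    rw [replace_single, replace_single, replace_single, replace_single]
    rw [List.flatMap_assoc, List.flatMap_assoc, List.flatMap_assoc]
    exact List.flatMap_congr (fun c _ => by
      rw [← four_subst_eq_hlChar c]
      simp [List.flatMap_assoc])
  rw [hB, hr]
  rw [join_map_flatMap '\n' hlChar (by decide)]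
  rw [join_splitOn]
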